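-- pv_equiv track=rewrite | github.com/meyer6/Puzzle-Ais-Python | Oh h1 Ai/Oh h1 Ai.py | Rewind
-- ===== SOURCE A (Python) =====
-- import copy
--
-- def Rewind(save_board,save_data):
--     i = len(save_board) - 1
--     if save_data[i][2] == 1:
--         save_board.pop()
--         save_data.pop
--         return Rewind(save_board,save_data)
--     board = copy.deepcopy(save_board[i])
--     save_data[i][2] = 1
--     board[save_data[i][1]][save_data[i][0]] = 1
--     return board,save_board,save_data
-- ===== SOURCE B (Python) =====
-- def Rewind(save_board, save_data):
--     j = len(save_board) - 1
--     while save_data[j][2] == 1: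
--         j -= 1
--     del save_board[j + 1:]
--     board = [row[:] for row in save_board[j]]
--     save_data[j][2] = 1
--     board[save_data[j][1]][save_data[j][0]] = 1
--     return board, save_board, save_data
-- ===== Notes on version B (the rewrite author's own statement) =====
-- stated objective: simpler
-- what changed: Replaces the tail recursion with pop-per-step by an iterative index search followed by a single slice truncation, and replaces deepcopy of the saved board by shallow row copies.
import Mathlib
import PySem

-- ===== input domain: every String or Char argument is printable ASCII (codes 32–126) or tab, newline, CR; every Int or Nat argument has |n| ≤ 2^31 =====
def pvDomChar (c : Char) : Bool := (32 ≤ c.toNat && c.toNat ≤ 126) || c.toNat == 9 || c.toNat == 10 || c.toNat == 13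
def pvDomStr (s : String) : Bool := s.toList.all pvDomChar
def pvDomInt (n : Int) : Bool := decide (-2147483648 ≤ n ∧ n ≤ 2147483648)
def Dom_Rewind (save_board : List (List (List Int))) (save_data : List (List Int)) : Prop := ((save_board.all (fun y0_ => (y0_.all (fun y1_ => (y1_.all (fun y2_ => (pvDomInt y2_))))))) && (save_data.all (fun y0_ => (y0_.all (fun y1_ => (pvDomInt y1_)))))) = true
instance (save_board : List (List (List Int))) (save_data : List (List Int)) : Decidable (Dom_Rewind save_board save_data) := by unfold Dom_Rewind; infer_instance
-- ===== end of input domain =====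

-- B replaces A's tail recursion (one pop per step) by an iterative index search plus a single
-- truncation; both Pythons mutate their arguments identically, and the return values are proved equal.


-- ===== PORT A =====
-- Literal port of A: if save_data[len(save_board)-1][2] == 1, pop save_board and recurse
-- ('save_data.pop' in A is never CALLED, so save_data is not popped), else deep-copy
-- save_board[i] (identity on Lean lists), set save_data[i][2] = 1 and board[...][...] = 1.
-- The 'save_board = []' branch is only a totality guard: Python raises there, Pre_ excludes it.
def Rewind (save_board : List (List (List Int))) (save_data : List (List Int)) : List (List Int) × List (List (List Int)) × List (List Int) :=
  let i : Int := (save_board.length : Int) - 1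
  if PySem.List.pyGetD (PySem.List.pyGetD save_data i []) 2 0 = 1 then
    if h : save_board = [] then ([], [], save_data)
    else Rewind save_board.dropLast save_data
  else
    let board := PySem.List.pyGetD save_board i []
    let save_data' := PySem.List.pySetD save_data i (PySem.List.pySetD (PySem.List.pyGetD save_data i []) 2 1)
    let row := PySem.List.pyGetD save_data' i []
    let y := PySem.List.pyGetD row 1 0
    let x := PySem.List.pyGetD row 0 0
    (PySem.List.pySetD board y (PySem.List.pySetD (PySem.List.pyGetD board y []) x 1), save_board, save_data')
termination_by save_board.length
decreasing_by have := List.length_pos_of_ne_nil h; simp [List.length_dropLast]; omega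

-- ===== PORT B =====
-- Port of Source B's 'while save_data[j][2] == 1: j -= 1'; the 'j = 0' guard is only for
-- totality (Python would step to a negative j there; Pre_ excludes it).
def pvFindJ (save_data : List (List Int)) (j : Nat) : Nat :=
  if PySem.List.pyGetD (PySem.List.pyGetD save_data (j : Int) []) 2 0 = 1 then
    match j with
    | 0 => 0
    | j' + 1 => pvFindJ save_data j'
  else j
termination_by j

-- Port of Source B: find j, truncate save_board once ('del save_board[j+1:]'), copy the rows of
-- save_board[j] (identity on Lean lists), then mark and place exactly as Source B does.
def Rewind_alt (save_board : List (List (List Int))) (save_data : List (List Int)) : List (List Int) × List (List (List Int)) × List (List Int) :=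
  let j := pvFindJ save_data (save_board.length - 1)
  let save_board' := save_board.take (j + 1)
  let board := PySem.List.pyGetD save_board' (j : Int) []
  let save_data' := PySem.List.pySetD save_data (j : Int) (PySem.List.pySetD (PySem.List.pyGetD save_data (j : Int) []) 2 1)
  let row := PySem.List.pyGetD save_data' (j : Int) []
  let y := PySem.List.pyGetD row 1 0
  let x := PySem.List.pyGetD row 0 0
  (PySem.List.pySetD board y (PySem.List.pySetD (PySem.List.pyGetD board y []) x 1), save_board', save_data')

-- ===== PRECONDITION & SPEC =====
-- Exactly the inputs on which Python A returns (no exception): some index j of save_board carries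
-- the last unvisited save — its flag is ≠ 1, every later flag is 1 (rows of length ≥ 3 wherever
-- read), and the saved coordinates index the saved board in Python's (possibly negative) range.
def Pre_Rewind (save_board : List (List (List Int))) (save_data : List (List Int)) : Prop :=
  ∃ j ∈ List.range save_board.length,
    save_board.length ≤ save_data.length ∧
    (∀ i ∈ List.range save_board.length, j < i →
      3 ≤ (save_data.getD i []).length ∧ (save_data.getD i []).getD 2 0 = 1) ∧
    3 ≤ (save_data.getD j []).length ∧ (save_data.getD j []).getD 2 0 ≠ 1 ∧
    PySem.Raise.InRange (save_board.getD j []).length ((save_data.getD j []).getD 1 0) ∧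
    PySem.Raise.InRange (PySem.List.pyGetD (save_board.getD j []) ((save_data.getD j []).getD 1 0) []).length ((save_data.getD j []).getD 0 0)

instance (save_board : List (List (List Int))) (save_data : List (List Int)) : Decidable (Pre_Rewind save_board save_data) := by unfold Pre_Rewind; infer_instance

def pvWitness_Rewind : List (List (List Int)) × List (List Int) := ([[[0]]], [[0, 0, 0]])

def Spec_Rewind (save_board : List (List (List Int))) (save_data : List (List Int)) (out : List (List Int) × List (List (List Int)) × List (List Int)) : Prop := out = Rewind_alt save_board save_data
instance (save_board : List (List (List Int))) (save_data : List (List Int)) (out : List (List Int) × List (List (List Int)) × List (List Int)) : Decidable (Spec_Rewind save_board save_data out) := by unfold Spec_Rewind; infer_instance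

-- ===== CLAIM (what is proved, stated in full; the proofs are below) =====
def Claim_equal_Rewind : Prop := ∀ (save_board : List (List (List Int))) (save_data : List (List Int)), Dom_Rewind save_board save_data → Pre_Rewind save_board save_data → Spec_Rewind save_board save_data (Rewind save_board save_data)

-- ===== LEMMAS AND PROOFS =====

-- The common final step, as a function of the stop index j and the truncated save_board.
def pvFinal (save_data : List (List Int)) (j : Nat) (save_board' : List (List (List Int))) : List (List Int) × List (List (List Int)) × List (List Int) :=
  let board := PySem.List.pyGetD save_board' (j : Int) []
  let save_data' := PySem.List.pySetD save_data (j : Int) (PySem.List.pySetD (PySem.List.pyGetD save_data (j : Int) []) 2 1)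
  let row := PySem.List.pyGetD save_data' (j : Int) []
  let y := PySem.List.pyGetD row 1 0
  let x := PySem.List.pyGetD row 0 0
  (PySem.List.pySetD board y (PySem.List.pySetD (PySem.List.pyGetD board y []) x 1), save_board', save_data')

theorem Rewind_alt_eq (save_board : List (List (List Int))) (save_data : List (List Int)) :
    Rewind_alt save_board save_data =
      pvFinal save_data (pvFindJ save_data (save_board.length - 1))
        (save_board.take (pvFindJ save_data (save_board.length - 1) + 1)) := rfl

theorem pvFlag_bridge (save_data : List (List Int)) (k : Nat) :
    PySem.List.pyGetD (PySem.List.pyGetD save_data (k : Int) []) 2 0 = (save_data.getD k []).getD 2 0 := by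
  simp [pysem]

theorem pvFindJ_eq (save_data : List (List Int)) (j : Nat)
    (hne : (save_data.getD j []).getD 2 0 ≠ 1) :
    ∀ m : Nat, j ≤ m →
    (∀ i : Nat, j < i → i ≤ m → (save_data.getD i []).getD 2 0 = 1) →
    pvFindJ save_data m = j := by
  intro m
  induction m with
  | zero =>
    intro hjm _
    have hj0 : j = 0 := by omega
    subst hj0
    rw [pvFindJ]
    split <;> rfl
  | succ m ih =>
    intro hjm hflags
    rw [pvFindJ]
    simp only [Nat.succ_eq_add_one]
    rw [pvFlag_bridge]
    by_cases hj : j = m + 1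
    · subst hj
      rw [if_neg hne]
    · rw [if_pos (hflags (m + 1) (by omega) (by omega))]
      exact ih (by omega) (fun i h1 h2 => hflags i h1 (by omega))

theorem Rewind_eq_final (save_data : List (List Int)) (j : Nat)
    (hlen3 : 3 ≤ (save_data.getD j []).length)
    (hne : (save_data.getD j []).getD 2 0 ≠ 1) :
    ∀ save_board : List (List (List Int)), j < save_board.length →
    (∀ i : Nat, j < i → i < save_board.length → (save_data.getD i []).getD 2 0 = 1) →
    Rewind save_board save_data = pvFinal save_data j (save_board.take (j + 1)) := by
  intro sb
  induction sb using List.reverseRecOn with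
  | nil => intro h _; simp at h
  | append_singleton xs x ih =>
    intro hjlt hflags
    have hlen : (xs ++ [x]).length = xs.length + 1 := by simp
    rw [Rewind.eq_def]
    dsimp only
    have hcast : ((xs ++ [x]).length : Int) - 1 = ((xs.length : Nat) : Int) := by
      simp
    by_cases hj : j = xs.length
    · -- A stops at the top entry
      subst hj
      have hcond : PySem.List.pyGetD (PySem.List.pyGetD save_data (((xs ++ [x]).length : Int) - 1) []) 2 0
          = (save_data.getD xs.length []).getD 2 0 := by
        rw [hcast]; simp [pysem]
      rw [if_neg (by rw [hcond]; exact hne)]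
      have htake : (xs ++ [x]).take (xs.length + 1) = xs ++ [x] := by
        rw [← hlen, List.take_length]
      rw [htake, hcast]
      rfl
    · -- flag at the top entry is 1: A pops and recurses
      have hjlt' : j < xs.length := by omega
      have hflag : (save_data.getD xs.length []).getD 2 0 = 1 :=
        hflags xs.length (by omega) (by omega)
      have hcond : PySem.List.pyGetD (PySem.List.pyGetD save_data (((xs ++ [x]).length : Int) - 1) []) 2 0
          = (save_data.getD xs.length []).getD 2 0 := by
        rw [hcast]; simp [pysem]
      rw [if_pos (by rw [hcond]; exact hflag), dif_neg (by simp)]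
      rw [List.dropLast_concat]
      rw [ih hjlt' (fun i h1 h2 => hflags i h1 (by omega))]
      congr 1
      exact (List.take_append_of_le_length (by omega)).symm

-- ===== VERDICT (by name: the statement is the Claim_ definition above) =====
theorem Rewind_spec : Claim_equal_Rewind := by
  intro sb sd _ hpre
  obtain ⟨j, hj, hlen, hflags, hlen3, hne, _, _⟩ := hpre
  rw [List.mem_range] at hj
  unfold Spec_Rewind
  rw [Rewind_alt_eq,
    pvFindJ_eq sd j hne (sb.length - 1) (by omega)
      (fun i h1 h2 => (hflags i (List.mem_range.mpr (by omega)) h1).2)]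
  exact Rewind_eq_final sd j hlen3 hne sb hj
    (fun i h1 h2 => (hflags i (List.mem_range.mpr h2) h1).2)
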